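-- pv_equiv track=rewrite | github.com/glianx/outdated_universal | projects/minimax_tictactoe.py/minimax_factorial.py | final_digit_strings
-- ===== SOURCE A (Python) =====
-- def final_digit_strings(n):
--     strings = []
--     for a in range(n):
--         for b in range(n):
--             if b == a: continue
--             for c in range(n):
--                 if c in (a,b): continue
--                 for d in range(n):
--                     if d in (a,b,c): continue
--                     for e in range(n):
--                         if e in (a,b,c,d): continue
--                         for f in range(n):
--                             if f in (a,b,c,d,e): continue
--                             for g in range(n):
--                                 if g in (a,b,c,d,e,f): continue
--                                 for h in range(n):
--                                     if h in (a,b,c,d,e,f,g): continue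
--                                     for i in range(n):
--                                         if i in (a,b,c,d,e,f,g,h): continue
--                                         strings.append([a,b,c,d,e,f,g,h,i])
--     return strings
-- ===== SOURCE B (Python) =====
-- def final_digit_strings(n):
--     def extend(pre, remaining):
--         if len(pre) == 9:
--             return [pre]
--         result = []
--         for v in remaining:
--             result += extend(pre + [v], [w for w in remaining if w != v])
--         return result
--     return extend([], list(range(n)))
-- ===== Notes on version B (the rewrite author's own statement) =====
-- stated objective: alternative
-- what changed: Replaces the nine hard-coded nested loops with a recursive backtracking helper that carries the chosen prefix and the list of still-available values (filtering out the chosen value at each step), so the depth-9 enumeration is one general recursion instead of nine literal loop levels.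
import Mathlib
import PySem

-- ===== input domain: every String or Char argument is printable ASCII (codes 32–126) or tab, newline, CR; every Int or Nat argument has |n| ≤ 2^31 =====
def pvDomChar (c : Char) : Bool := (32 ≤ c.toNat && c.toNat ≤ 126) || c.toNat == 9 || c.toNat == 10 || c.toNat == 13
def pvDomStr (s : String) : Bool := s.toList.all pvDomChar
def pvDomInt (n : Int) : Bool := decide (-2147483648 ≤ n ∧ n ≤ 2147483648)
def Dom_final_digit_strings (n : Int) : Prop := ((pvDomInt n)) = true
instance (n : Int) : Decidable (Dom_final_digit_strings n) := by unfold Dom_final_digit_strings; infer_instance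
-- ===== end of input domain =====

-- B replaces A's nine hard-coded nested loops by one recursive backtracking helper over a
-- shrinking list of available values (alternative decomposition, same asymptotic cost).


-- ===== PORT A =====
-- literal port: nine nested for-loops over range(n); 'continue' on membership in the
-- tuple of already chosen values (tuple membership ported as List membership).
def final_digit_strings (n : Int) : List (List Int) :=
  (PySem.List.pyRange 0 n 1).foldl (fun strings a =>
    (PySem.List.pyRange 0 n 1).foldl (fun strings b =>
      if b = a then strings else
      (PySem.List.pyRange 0 n 1).foldl (fun strings c =>
        if c ∈ ([a, b] : List Int) then strings else
        (PySem.List.pyRange 0 n 1).foldl (fun strings d =>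
          if d ∈ ([a, b, c] : List Int) then strings else
          (PySem.List.pyRange 0 n 1).foldl (fun strings e =>
            if e ∈ ([a, b, c, d] : List Int) then strings else
            (PySem.List.pyRange 0 n 1).foldl (fun strings f =>
              if f ∈ ([a, b, c, d, e] : List Int) then strings else
              (PySem.List.pyRange 0 n 1).foldl (fun strings g =>
                if g ∈ ([a, b, c, d, e, f] : List Int) then strings else
                (PySem.List.pyRange 0 n 1).foldl (fun strings h =>
                  if h ∈ ([a, b, c, d, e, f, g] : List Int) then strings else
                  (PySem.List.pyRange 0 n 1).foldl (fun strings i =>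
                    if i ∈ ([a, b, c, d, e, f, g, h] : List Int) then strings else
                    strings ++ [[a, b, c, d, e, f, g, h, i]]) strings) strings) strings) strings) strings) strings) strings) strings) []

-- ===== PORT B =====
-- helper 'extend(pre, remaining)' from Source B; the Python recursion stops at len(pre) == 9,
-- ported as fuel = 9 - len(pre), which decreases by one exactly when len(pre) grows by one.
def fdsExtend (fuel : Nat) (pre remaining : List Int) : List (List Int) :=
  match fuel with
  | 0 => [pre]
  | k + 1 =>
    remaining.foldl
      (fun result v =>
        result ++ fdsExtend k (pre ++ [v]) (remaining.filter (fun w => w ≠ v))) []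

def final_digit_strings_alt (n : Int) : List (List Int) :=
  fdsExtend 9 [] (PySem.List.pyRange 0 n 1)

-- ===== PRECONDITION & SPEC =====
def Spec_final_digit_strings (n : Int) (out : List (List Int)) : Prop := out = final_digit_strings_alt n
instance (n : Int) (out : List (List Int)) : Decidable (Spec_final_digit_strings n out) := by unfold Spec_final_digit_strings; infer_instance

-- ===== CLAIM (what is proved, stated in full; the proofs are below) =====
def Claim_equal_final_digit_strings : Prop := ∀ (n : Int), Dom_final_digit_strings n → Spec_final_digit_strings n (final_digit_strings n)

-- ===== LEMMAS AND PROOFS =====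

-- A 'continue'-style loop that appends g x unless p x, as a flatMap.
theorem pv_foldl_skip {α β : Type} (l : List α) (p : α → Prop) [DecidablePred p]
    (g : α → List β) (acc : List β) :
    l.foldl (fun acc x => if p x then acc else acc ++ g x) acc
      = acc ++ l.flatMap (fun x => if p x then [] else g x) := by
  induction l generalizing acc with
  | nil => simp
  | cons x xs ih =>
    by_cases hx : p x <;> simp [hx, ih, List.append_assoc]

-- flatMap with a skip condition = flatMap over the filtered list.
theorem pv_flatMap_skip {α β : Type} (l : List α) (p : α → Prop) [DecidablePred p]
    (g : α → List β) :
    l.flatMap (fun x => if p x then [] else g x)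
      = (l.filter (fun x => ¬ p x)).flatMap g := by
  induction l with
  | nil => simp
  | cons x xs ih =>
    by_cases hx : p x <;> simp [hx, ih]

-- A's loop nest written as a uniform recursion over the chosen prefix.
def fdsA (n : Int) (fuel : Nat) (chosen : List Int) : List (List Int) :=
  match fuel with
  | 0 => [chosen]
  | k + 1 =>
    (PySem.List.pyRange 0 n 1).flatMap
      (fun v => if v ∈ chosen then [] else fdsA n k (chosen ++ [v]))

theorem fdsA_eq_extend (n : Int) (fuel : Nat) :
    ∀ chosen, fdsA n fuel chosen
      = fdsExtend fuel chosen ((PySem.List.pyRange 0 n 1).filter (fun w => w ∉ chosen)) := by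
  induction fuel with
  | zero => intro chosen; simp [fdsA, fdsExtend]
  | succ k ih =>
    intro chosen
    rw [fdsA, fdsExtend, PySem.List.foldl_append_eq_flatMap, pv_flatMap_skip]
    simp only [List.nil_append]
    apply List.flatMap_congr
    intro v _
    rw [ih (chosen ++ [v]), List.filter_filter]
    congr 1
    apply List.filter_congr
    intro w _
    simp [List.mem_append, and_comm]

theorem fdsA_nine (n : Int) : final_digit_strings n = fdsA n 9 [] := by
  simp only [final_digit_strings, pv_foldl_skip, fdsA,
    PySem.List.foldl_append_eq_flatMap, List.nil_append]
  simp

-- ===== VERDICT (by name: the statement is the Claim_ definition above) =====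
theorem final_digit_strings_spec : Claim_equal_final_digit_strings := by
  intro n _
  unfold Spec_final_digit_strings final_digit_strings_alt
  rw [fdsA_nine, fdsA_eq_extend]
  congr 1
  simp
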